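-- pv_equiv track=rewrite | github.com/DenisMartonak/cryptography | Algorithms/Playfair.py | text_process
-- ===== SOURCE A (Python) =====
-- NUMBERS = {
--     '0': 'XNULAX',
--     '1': 'XJEDNAX',
--     '2': 'XDVAX',
--     '3': 'XTRIX',
--     '4': 'XSTYRIX',
--     '5': 'XPATX',
--     '6': 'XSESTX',
--     '7': 'XSEDEMX',
--     '8': 'XOSEMX',
--     '9': 'XDEVATX'
-- }
--
-- SPECIAL = {
--     ' ': 'XMEZERAX'
-- }
--
-- def text_process(text: str, key: str):
--     if not key or not key.strip():
--         key = "DEFAULT"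
--
--     for digit, replacement in NUMBERS.items():
--         text = text.replace(digit, replacement)
--
--     for char, replacement in SPECIAL.items():
--         text = text.replace(char, replacement)
--
--     filtered = ''.join(ch for ch in text if ch.isalpha())
--
--     return filtered, key.upper()
-- ===== SOURCE B (Python) =====
-- NUMBERS = {
--     '0': 'XNULAX',
--     '1': 'XJEDNAX',
--     '2': 'XDVAX',
--     '3': 'XTRIX',
--     '4': 'XSTYRIX',
--     '5': 'XPATX',
--     '6': 'XSESTX',
--     '7': 'XSEDEMX',
--     '8': 'XOSEMX',
--     '9': 'XDEVATX'
-- }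
--
-- SPACE_WORD = 'XMEZERAX'
--
--
-- def _expand(ch):
--     w = NUMBERS.get(ch)
--     if w is not None:
--         return w
--     if ch == ' ':
--         return SPACE_WORD
--     if ch.isalpha():
--         return ch
--     return ''
--
--
-- def text_process(text: str, key: str):
--     if not key or not key.strip():
--         key = "DEFAULT"
--     return ''.join(_expand(ch) for ch in text), key.upper()
-- ===== Notes on version B (the rewrite author's own statement) =====
-- stated objective: alternative
-- what changed: Replaced the eleven sequential whole-string str.replace passes followed by a filtering comprehension with a single character-by-character dispatch (_expand) joined once; correct because every replacement word is pure letters.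
import Mathlib
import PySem

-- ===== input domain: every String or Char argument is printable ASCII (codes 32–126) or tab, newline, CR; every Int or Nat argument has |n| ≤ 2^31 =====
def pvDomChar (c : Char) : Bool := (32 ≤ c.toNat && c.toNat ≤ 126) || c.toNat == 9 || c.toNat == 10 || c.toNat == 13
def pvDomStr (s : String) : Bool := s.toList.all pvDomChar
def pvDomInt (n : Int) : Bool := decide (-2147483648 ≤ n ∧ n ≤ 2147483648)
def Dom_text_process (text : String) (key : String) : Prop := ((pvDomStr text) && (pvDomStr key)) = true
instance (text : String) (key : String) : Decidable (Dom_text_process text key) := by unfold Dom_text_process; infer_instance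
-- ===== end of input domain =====

-- B replaces A's eleven sequential whole-string replace passes + filtering join by one per-character dispatch; same return value (alternative decomposition, no speed claim).

-- ===== PORT A =====
def pvNUMBERS : PySem.Dict String String := ⟨[("0", "XNULAX"), ("1", "XJEDNAX"), ("2", "XDVAX"), ("3", "XTRIX"), ("4", "XSTYRIX"), ("5", "XPATX"), ("6", "XSESTX"), ("7", "XSEDEMX"), ("8", "XOSEMX"), ("9", "XDEVATX")]⟩

def pvSPECIAL : PySem.Dict String String := ⟨[(" ", "XMEZERAX")]⟩

def text_process (text : String) (key : String) : String × String :=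
  let key := if key = "" ∨ PySem.Str.strip key = "" then "DEFAULT" else key
  let text := (PySem.Dict.items pvNUMBERS).foldl (fun t p => PySem.Str.replace t p.1 p.2) text
  let text := (PySem.Dict.items pvSPECIAL).foldl (fun t p => PySem.Str.replace t p.1 p.2) text
  let filtered := String.ofList (text.toList.filter (fun ch => PySem.Chars.isalpha ch))
  (filtered, PySem.Str.upper key)

-- ===== PORT B =====
def pvNUMBERS_alt : PySem.Dict Char String := ⟨[('0', "XNULAX"), ('1', "XJEDNAX"), ('2', "XDVAX"), ('3', "XTRIX"), ('4', "XSTYRIX"), ('5', "XPATX"), ('6', "XSESTX"), ('7', "XSEDEMX"), ('8', "XOSEMX"), ('9', "XDEVATX")]⟩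

def pvSPACE_WORD : String := "XMEZERAX"

def pvExpand (ch : Char) : List Char :=
  match PySem.Dict.get? pvNUMBERS_alt ch with
  | some w => w.toList
  | none =>
    if ch = ' ' then pvSPACE_WORD.toList
    else if PySem.Chars.isalpha ch then [ch]
    else []

def text_process_alt (text : String) (key : String) : String × String :=
  let key := if key = "" ∨ PySem.Str.strip key = "" then "DEFAULT" else key
  (String.ofList (text.toList.flatMap pvExpand), PySem.Str.upper key)

-- ===== PRECONDITION & SPEC =====
def Spec_text_process (text : String) (key : String) (out : String × String) : Prop := out = text_process_alt text key
instance (text : String) (key : String) (out : String × String) : Decidable (Spec_text_process text key out) := by unfold Spec_text_process; infer_instance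

-- ===== CLAIM (what is proved, stated in full; the proofs are below) =====
def Claim_equal_text_process : Prop := ∀ (text : String) (key : String), Dom_text_process text key → Spec_text_process text key (text_process text key)

-- ===== LEMMAS AND PROOFS =====

/-- Single-character substitution as a flatMap. -/
def pvSubst (d : Char) (new : List Char) (c : Char) : List Char :=
  if c = d then new else [c]

theorem replace_go_single (d : Char) (new : List Char) :
    ∀ (l : List Char) (fuel : Nat) (acc : List Char), l.length ≤ fuel →
      PySem.Chars.replace.go [d] new fuel l acc = acc.reverse ++ l.flatMap (pvSubst d new) := by
  intro l
  induction l with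
  | nil =>
    intro fuel acc _
    cases fuel <;> simp [PySem.Chars.replace.go]
  | cons c t ih =>
    intro fuel acc h
    cases fuel with
    | zero => simp at h
    | succ fuel =>
      simp only [PySem.Chars.replace.go]
      have hpre : [d].isPrefixOf (c :: t) = (d == c) := by simp [List.isPrefixOf]
      by_cases hc : c = d
      · subst hc
        rw [hpre, if_pos (by simp)]
        rw [show List.drop [c].length (c :: t) = t from rfl]
        rw [ih fuel (new.reverse ++ acc) (by simpa using h)]
        simp [pvSubst]
      · rw [hpre, if_neg (by simp [Ne.symm hc])]
        rw [ih fuel (c :: acc) (by simpa using h)]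
        simp [pvSubst, hc]

theorem replace_single (d : Char) (new l : List Char) :
    PySem.Chars.replace l [d] new = l.flatMap (pvSubst d new) := by
  rw [PySem.Chars.replace]
  simp only [List.isEmpty_cons, Bool.false_eq_true, if_false]
  rw [replace_go_single d new l l.length [] le_rfl]
  simp

theorem per_char (c : Char) :
    List.flatMap (fun c1 =>
      List.flatMap (fun c2 =>
        List.flatMap (fun c3 =>
          List.flatMap (fun c4 =>
            List.flatMap (fun c5 =>
              List.flatMap (fun c6 =>
                List.flatMap (fun c7 =>
                  List.flatMap (fun c8 =>
                    List.flatMap (fun c9 =>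
                      List.flatMap (fun c10 =>
                          List.filter (fun ch => PySem.Chars.isalpha ch)
                            (pvSubst ' ' "XMEZERAX".toList c10))
                        (pvSubst '9' "XDEVATX".toList c9))
                      (pvSubst '8' "XOSEMX".toList c8))
                    (pvSubst '7' "XSEDEMX".toList c7))
                  (pvSubst '6' "XSESTX".toList c6))
                (pvSubst '5' "XPATX".toList c5))
              (pvSubst '4' "XSTYRIX".toList c4))
            (pvSubst '3' "XTRIX".toList c3))
          (pvSubst '2' "XDVAX".toList c2))
        (pvSubst '1' "XJEDNAX".toList c1))
      (pvSubst '0' "XNULAX".toList c) = pvExpand c := by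
  by_cases h0 : c = '0'; · subst h0; decide
  by_cases h1 : c = '1'; · subst h1; decide
  by_cases h2 : c = '2'; · subst h2; decide
  by_cases h3 : c = '3'; · subst h3; decide
  by_cases h4 : c = '4'; · subst h4; decide
  by_cases h5 : c = '5'; · subst h5; decide
  by_cases h6 : c = '6'; · subst h6; decide
  by_cases h7 : c = '7'; · subst h7; decide
  by_cases h8 : c = '8'; · subst h8; decide
  by_cases h9 : c = '9'; · subst h9; decide
  by_cases hs : c = ' '; · subst hs; decide
  have e : ∀ d : Char, ¬ c = d → (d == c) = false :=
    fun d hd => beq_eq_false_iff_ne.mpr (fun h => hd h.symm)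
  simp [pvSubst, h0, h1, h2, h3, h4, h5, h6, h7, h8, h9, hs,
        pvExpand, pvNUMBERS_alt, PySem.Dict.get?, List.find?, List.filter,
        e _ h0, e _ h1, e _ h2, e _ h3, e _ h4, e _ h5, e _ h6, e _ h7, e _ h8, e _ h9]
  cases PySem.Chars.isalpha c <;> simp

-- ===== VERDICT (by name: the statement is the Claim_ definition above) =====
theorem text_process_spec : Claim_equal_text_process := by
  intro text key _
  unfold Spec_text_process text_process text_process_alt
  simp only [pvNUMBERS, pvSPECIAL, List.foldl,
             PySem.Str.replace, Prod.mk.injEq]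
  refine ⟨?_, trivial⟩
  simp only [String.toList_ofList,
    show ("0" : String).toList = ['0'] from rfl, show ("1" : String).toList = ['1'] from rfl,
    show ("2" : String).toList = ['2'] from rfl, show ("3" : String).toList = ['3'] from rfl,
    show ("4" : String).toList = ['4'] from rfl, show ("5" : String).toList = ['5'] from rfl,
    show ("6" : String).toList = ['6'] from rfl, show ("7" : String).toList = ['7'] from rfl,
    show ("8" : String).toList = ['8'] from rfl, show ("9" : String).toList = ['9'] from rfl,
    show (" " : String).toList = [' '] from rfl]
  simp only [replace_single]
  refine congrArg String.ofList ?_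
  simp only [List.flatMap_assoc, List.filter_flatMap]
  exact List.flatMap_congr (fun c _ => per_char c)
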